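-- pv_equiv track=rewrite | github.com/msteeledadzie422/data-structures-and-algorithms | python/code_challenges/sorting_comparisons/sorting_comparisons.py | compare_title
-- ===== SOURCE A (Python) =====
-- def compare_title(a, b):
--     def remove_leading_articles(title):
--         articles = ["A ", "An ", "The "]
--         for article in articles:
--             if title.startswith(article):
--                 return title[len(article):]
--         return title
--
--     title_a = remove_leading_articles(a["title"])
--     title_b = remove_leading_articles(b["title"])
--
--     if title_a > title_b:
--         return 1
--     elif title_a < title_b:
--         return -1
--     return 0
-- ===== SOURCE B (Python) =====
-- def compare_title(a, b):
--     def offset(t):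
--         if t[:2] == "A ":
--             return 2
--         if t[:3] == "An ":
--             return 3
--         if t[:4] == "The ":
--             return 4
--         return 0
--
--     ta, tb = a["title"], b["title"]
--     i, j = offset(ta), offset(tb)
--     # walk both titles in lockstep past their article offsets; decide at the
--     # first differing character, else by which remainder runs out first
--     while i < len(ta) and j < len(tb):
--         if ta[i] != tb[j]:
--             return 1 if ta[i] > tb[j] else -1
--         i += 1
--         j += 1
--     ra, rb = len(ta) - i, len(tb) - j
--     return (ra > rb) - (ra < rb)
-- ===== Notes on version B (the rewrite author's own statement) =====
-- stated objective: alternative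
-- what changed: A builds two stripped strings (startswith loop + slice) and compares them with Python string <,>; B never builds stripped strings: it computes a numeric article offset per title and runs a two-pointer character-by-character walk over both originals, returning the sign at the first differing character or from the remaining lengths.
import Mathlib
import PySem

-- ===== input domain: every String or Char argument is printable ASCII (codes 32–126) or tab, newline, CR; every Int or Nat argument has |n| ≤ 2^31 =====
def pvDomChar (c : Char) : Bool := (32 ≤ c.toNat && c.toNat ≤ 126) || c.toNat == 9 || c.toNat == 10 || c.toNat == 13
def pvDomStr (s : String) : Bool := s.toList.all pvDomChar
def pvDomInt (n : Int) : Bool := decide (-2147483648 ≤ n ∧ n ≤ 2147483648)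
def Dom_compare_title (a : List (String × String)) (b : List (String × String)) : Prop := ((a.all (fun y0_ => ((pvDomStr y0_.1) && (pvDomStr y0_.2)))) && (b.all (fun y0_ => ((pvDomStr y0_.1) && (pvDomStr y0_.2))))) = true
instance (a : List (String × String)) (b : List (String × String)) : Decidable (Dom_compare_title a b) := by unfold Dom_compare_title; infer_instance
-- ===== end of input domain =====

-- B never builds the stripped strings A builds: it computes a numeric article offset per
-- title and walks both originals character by character (two pointers), returning the sign
-- at the first differing character or from the remaining lengths; return value proved equal.
-- ===== PORT A =====
-- A's helper: try each article prefix in order; on a match return title[len(article):]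
def removeLeadingArticlesLoop (title : String) : List String → String
  | [] => title
  | article :: rest =>
    if PySem.Str.startswith title article then
      PySem.Str.slice title (some ((PySem.Str.len article : Int))) none
    else removeLeadingArticlesLoop title rest

def remove_leading_articles (title : String) : String :=
  removeLeadingArticlesLoop title ["A ", "An ", "The "]

def compare_title (a : List (String × String)) (b : List (String × String)) : Int :=
  match (PySem.Dict.mk a).get? "title", (PySem.Dict.mk b).get? "title" with
  | some ta, some tb =>
    let title_a := remove_leading_articles ta
    let title_b := remove_leading_articles tb
    if title_a > title_b then 1
    else if title_a < title_b then -1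
    else 0
  | _, _ => 0  -- unreachable under Pre_ (KeyError in Python)

-- ===== PORT B =====
-- B's offset helper: t[:n] == article, tried in the same three-branch chain.
def articleOffset (t : String) : Nat :=
  if t.toList.take 2 = ['A', ' '] then 2
  else if t.toList.take 3 = ['A', 'n', ' '] then 3
  else if t.toList.take 4 = ['T', 'h', 'e', ' '] then 4
  else 0

-- B's while loop: lockstep walk from the two offsets (here: over the dropped suffixes);
-- when one side runs out, (ra > rb) - (ra < rb) on the remaining lengths.
def cmpWalk : List Char → List Char → Int
  | c :: cs, d :: ds =>
    if c ≠ d then (if c > d then 1 else -1) else cmpWalk cs ds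
  | xs, ys =>
    (if ys.length < xs.length then (1 : Int) else 0) -
      (if xs.length < ys.length then (1 : Int) else 0)

def compare_title_alt (a : List (String × String)) (b : List (String × String)) : Int :=
  match (PySem.Dict.mk a).get? "title" with
  | none => 0  -- unreachable under Pre_ (KeyError in Python)
  | some ta =>
    match (PySem.Dict.mk b).get? "title" with
    | none => 0  -- unreachable under Pre_ (KeyError in Python)
    | some tb =>
      cmpWalk (ta.toList.drop (articleOffset ta)) (tb.toList.drop (articleOffset tb))

-- ===== PRECONDITION & SPEC =====
-- Pre_: both dicts carry a "title" key (otherwise Python A raises KeyError)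
def Pre_compare_title (a : List (String × String)) (b : List (String × String)) : Prop :=
  ((PySem.Dict.mk a).get? "title").isSome ∧ ((PySem.Dict.mk b).get? "title").isSome
instance (a : List (String × String)) (b : List (String × String)) : Decidable (Pre_compare_title a b) := by unfold Pre_compare_title; infer_instance

def pvWitness_compare_title : (List (String × String)) × (List (String × String)) :=
  ([("title", "The Hobbit")], [("title", "An Apple")])

def Spec_compare_title (a : List (String × String)) (b : List (String × String)) (out : Int) : Prop := out = compare_title_alt a b
instance (a : List (String × String)) (b : List (String × String)) (out : Int) : Decidable (Spec_compare_title a b out) := by unfold Spec_compare_title; infer_instance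

-- ===== CLAIM (what is proved, stated in full; the proofs are below) =====
def Claim_equal_compare_title : Prop := ∀ (a : List (String × String)) (b : List (String × String)), Dom_compare_title a b → Pre_compare_title a b → Spec_compare_title a b (compare_title a b)

-- ===== LEMMAS AND PROOFS =====

-- prefix as a take-equation (the form B's offset tests use)
theorem prefix_iff_take {l1 l2 : List Char} : l1 <+: l2 ↔ l2.take l1.length = l1 :=
  ⟨fun h => (List.prefix_iff_eq_take.mp h) ▸ rfl, fun h => h ▸ List.take_prefix _ _⟩

-- A's stripped title, as a list of chars, is the original dropped at B's offset
theorem slice_from_toList (s : String) (n : Nat) :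
    (PySem.Str.slice s (some (n : Int)) none).toList = s.toList.drop n := by
  simp [pysem]

theorem strip_eq_drop (s : String) :
    (remove_leading_articles s).toList = s.toList.drop (articleOffset s) := by
  simp only [remove_leading_articles, removeLeadingArticlesLoop, articleOffset]
  by_cases hA : s.toList.take 2 = ['A', ' ']
  · have hsw : PySem.Str.startswith s "A " = true := by
      simp only [PySem.Str.startswith_eq]
      exact (PySem.Chars.startswith_iff _ _).mpr (prefix_iff_take.mpr hA)
    rw [if_pos hsw, if_pos hA,
      show (PySem.Str.len "A ") = ((2 : Nat) : Int) from by decide]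
    exact slice_from_toList s 2
  · have hswA : ¬ PySem.Str.startswith s "A " = true := by
      simp only [PySem.Str.startswith_eq]
      intro hc
      exact hA (prefix_iff_take.mp ((PySem.Chars.startswith_iff _ _).mp hc))
    rw [if_neg hswA, if_neg hA]
    by_cases hAn : s.toList.take 3 = ['A', 'n', ' ']
    · have hsw : PySem.Str.startswith s "An " = true := by
        simp only [PySem.Str.startswith_eq]
        exact (PySem.Chars.startswith_iff _ _).mpr (prefix_iff_take.mpr hAn)
      rw [if_pos hsw, if_pos hAn,
        show (PySem.Str.len "An ") = ((3 : Nat) : Int) from by decide]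
      exact slice_from_toList s 3
    · have hswAn : ¬ PySem.Str.startswith s "An " = true := by
        simp only [PySem.Str.startswith_eq]
        intro hc
        exact hAn (prefix_iff_take.mp ((PySem.Chars.startswith_iff _ _).mp hc))
      rw [if_neg hswAn, if_neg hAn]
      by_cases hThe : s.toList.take 4 = ['T', 'h', 'e', ' ']
      · have hsw : PySem.Str.startswith s "The " = true := by
          simp only [PySem.Str.startswith_eq]
          exact (PySem.Chars.startswith_iff _ _).mpr (prefix_iff_take.mpr hThe)
        rw [if_pos hsw, if_pos hThe,
          show (PySem.Str.len "The ") = ((4 : Nat) : Int) from by decide]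
        exact slice_from_toList s 4
      · have hswThe : ¬ PySem.Str.startswith s "The " = true := by
          simp only [PySem.Str.startswith_eq]
          intro hc
          exact hThe (prefix_iff_take.mp ((PySem.Chars.startswith_iff _ _).mp hc))
        rw [if_neg hswThe, if_neg hThe]
        simp

-- B's two-pointer walk computes exactly the sign of the lexicographic comparison
theorem cmpWalk_eq_cmp (xs : List Char) : ∀ ys : List Char,
    cmpWalk xs ys = if xs < ys then -1 else if ys < xs then 1 else 0 := by
  induction xs with
  | nil =>
    intro ys
    cases ys with
    | nil => simp [cmpWalk]
    | cons d ds => simp [cmpWalk, List.nil_lt_cons]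
  | cons c cs ih =>
    intro ys
    cases ys with
    | nil => simp [cmpWalk, List.nil_lt_cons]
    | cons d ds =>
      by_cases hcd : c = d
      · subst hcd
        simp only [cmpWalk, ne_eq, not_true_eq_false, if_false, ih ds,
          List.cons_lt_cons_iff]
        simp
      · rcases lt_trichotomy c d with h | h | h
        · have h1 : (c :: cs : List Char) < d :: ds := List.cons_lt_cons_iff.mpr (Or.inl h)
          have h2 : ¬ (d :: ds : List Char) < c :: cs := by
            rw [List.cons_lt_cons_iff]
            rintro (h' | ⟨h', _⟩)
            · exact absurd h (not_lt_of_gt h')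
            · exact hcd h'.symm
          simp [cmpWalk, hcd, not_lt_of_gt h, h1]
        · exact absurd h hcd
        · have h1 : (d :: ds : List Char) < c :: cs := List.cons_lt_cons_iff.mpr (Or.inl h)
          have h2 : ¬ (c :: cs : List Char) < d :: ds := by
            rw [List.cons_lt_cons_iff]
            rintro (h' | ⟨h', _⟩)
            · exact absurd h (not_lt_of_gt h')
            · exact hcd h'
          simp [cmpWalk, hcd, h, h1, h2]

-- ===== VERDICT (by name: the statement is the Claim_ definition above) =====
theorem compare_title_spec : Claim_equal_compare_title := by
  intro a b _hdom hpre
  unfold Spec_compare_title compare_title compare_title_alt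
  obtain ⟨ha, hb⟩ := hpre
  obtain ⟨ta, hta⟩ := Option.isSome_iff_exists.mp ha
  obtain ⟨tb, htb⟩ := Option.isSome_iff_exists.mp hb
  rw [hta, htb]
  simp only []
  rw [cmpWalk_eq_cmp, ← strip_eq_drop, ← strip_eq_drop]
  rcases lt_trichotomy ((remove_leading_articles ta).toList) ((remove_leading_articles tb).toList)
    with h | h | h
  · rw [if_neg (fun hgt => absurd (String.lt_iff_toList_lt.mp hgt) (not_lt_of_gt h)),
      if_pos (String.lt_iff_toList_lt.mpr h), if_pos h]
  · have hs : remove_leading_articles ta = remove_leading_articles tb :=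
      String.toList_injective h
    simp [hs]
  · rw [if_pos (String.lt_iff_toList_lt.mpr h), if_neg (not_lt_of_gt h), if_pos h]
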